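-- pv_equiv track=rewrite | github.com/tiberiucorbu/k40-whisperer | nano_library.py | _data_packet
-- ===== SOURCE A (Python) =====
-- def _crc(line):
--     """
--     CRC algorithm derived from OneWire.cpp.
--
--     Latest version of library can be found at
--     http://www.pjrc.com/teensy/td_libs_OneWire.html .
--     """
--     crc = 0
--     for char in line:
--         for _ in range(8):
--             mix = (crc ^ char) & 0x01
--             crc >>= 1
--             if (mix):
--                 crc ^= 0x8C
--             char >>= 1
--     return crc
--
-- _TYPE_DATA = 166
--
-- def _data_packet(data):
--     if len(data) > 30:
--         raise Exception("Data too long to fit in packet")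
--
--     res = []
--     res.append(_TYPE_DATA)
--     res.append(0)  # always zero?
--     for d in data:
--         res.append(ord(d))
--     # packet is always 34 bytes (including CRC, header, terminator and zero)
--     res += [70 for _ in range(32 - len(res))]
--     res.append(_TYPE_DATA)
--     res.append(_crc(res[1:-1]))
--     return res
-- ===== SOURCE B (Python) =====
-- # Table-driven CRC-8 (Dallas/Maxim, reflected poly 0x8C): the 256-entry table is
-- # precomputed once, so the per-byte work is one xor + one lookup instead of an
-- # 8-iteration bit loop; packet framing built in one expression.
--
-- _CRC_TABLE = []
-- for _i in range(256):
--     _c = _i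
--     for _ in range(8):
--         _c = (_c >> 1) ^ 0x8C if _c & 1 else _c >> 1
--     _CRC_TABLE.append(_c)
--
--
-- def _data_packet(data):
--     if len(data) > 30:
--         raise Exception("Data too long to fit in packet")
--     body = [0] + [ord(d) for d in data] + [70] * (30 - len(data))
--     crc = 0
--     for b in body:
--         crc = _CRC_TABLE[(crc ^ b) & 0xFF]
--     return [166] + body + [166, crc]
-- ===== Notes on version B (the rewrite author's own statement) =====
-- stated objective: faster
-- what changed: Replaces the per-byte 8-iteration bit-shift CRC loop with a precomputed 256-entry CRC-8 table (one xor + one lookup per byte) and builds the 34-byte packet framing in a single expression instead of incremental appends plus a slice.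
import Mathlib
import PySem

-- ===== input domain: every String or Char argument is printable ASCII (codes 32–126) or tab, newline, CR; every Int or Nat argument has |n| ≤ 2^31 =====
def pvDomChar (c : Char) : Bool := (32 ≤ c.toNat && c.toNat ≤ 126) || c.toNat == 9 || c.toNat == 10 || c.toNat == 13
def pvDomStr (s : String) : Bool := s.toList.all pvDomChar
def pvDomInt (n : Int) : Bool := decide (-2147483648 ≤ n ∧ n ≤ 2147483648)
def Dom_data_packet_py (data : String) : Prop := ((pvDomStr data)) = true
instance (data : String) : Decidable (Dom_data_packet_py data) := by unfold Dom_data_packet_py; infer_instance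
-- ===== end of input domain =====

-- B replaces A's per-byte 8-iteration bit-shift CRC with a precomputed 256-entry CRC-8
-- table lookup and builds the packet framing in one expression (objective: faster).

-- ===== PORT A =====
-- inner 'for _ in range(8)' loop of _crc: state is (crc, char)
def crcByteLoop (crc char : Int) : Nat → Int × Int
  | 0 => (crc, char)
  | n + 1 =>
    let mix := PySem.Int.band (PySem.Int.bxor crc char) 1
    let crc1 := crc >>> 1
    let crc2 := if mix ≠ 0 then PySem.Int.bxor crc1 0x8C else crc1
    crcByteLoop crc2 (char >>> 1) n

-- _crc(line)
def crc_py (line : List Int) : Int :=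
  line.foldl (fun crc char => (crcByteLoop crc char 8).1) 0

def data_packet_py (data : String) : List Int :=
  if data.length > 30 then []  -- Python raises Exception here; these inputs are outside Pre_
  else
    let res1 : List Int := [166, 0] ++ data.toList.map (fun d => ((d.toNat : Int)))
    let res2 := res1 ++ (List.range (32 - res1.length)).map (fun _ => (70 : Int))
    let res3 := res2 ++ [166]
    res3 ++ [crc_py (PySem.List.slice res3 (some 1) (some (-1)))]

-- ===== PORT B =====
-- one table entry: the 8-iteration 'c = (c >> 1) ^ 0x8C if c & 1 else c >> 1' loop of Source B
def crcStep (c : Nat) : Nat := if c &&& 1 = 1 then (c >>> 1) ^^^ 0x8C else c >>> 1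

-- _CRC_TABLE
def crcTable : List Int := (List.range 256).map (fun i => ((crcStep^[8] i : Nat) : Int))

def data_packet_py_alt (data : String) : List Int :=
  if data.length > 30 then []  -- same guard: B's Python also raises here
  else
    let body : List Int :=
      (0 : Int) :: (data.toList.map (fun d => ((d.toNat : Int))) ++ List.replicate (30 - data.length) 70)
    -- _CRC_TABLE[(crc ^ b) & 0xFF]: the index is in [0,255] by construction, so getD/toNat is exact
    let crc := body.foldl (fun crc b => crcTable.getD (PySem.Int.band (PySem.Int.bxor crc b) 255).toNat 0) 0
    [166] ++ body ++ [166, crc]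

-- ===== PRECONDITION & SPEC =====
-- Pre_ excludes exactly the inputs on which A raises Exception: strings longer than 30 chars.
def Pre_data_packet_py (data : String) : Prop := data.length ≤ 30
instance (data : String) : Decidable (Pre_data_packet_py data) := by unfold Pre_data_packet_py; infer_instance
def pvWitness_data_packet_py : String := "Hi"

def Spec_data_packet_py (data : String) (out : List Int) : Prop := out = data_packet_py_alt data
instance (data : String) (out : List Int) : Decidable (Spec_data_packet_py data out) := by unfold Spec_data_packet_py; infer_instance

-- ===== CLAIM (what is proved, stated in full; the proofs are below) =====
def Claim_equal_data_packet_py : Prop := ∀ (data : String), Dom_data_packet_py data → Pre_data_packet_py data → Spec_data_packet_py data (data_packet_py data)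

-- ===== LEMMAS AND PROOFS =====

-- Nat-level model of A's inner 8-step bit loop (only the crc component is kept)
def natLoop : Nat → Nat → Nat → Nat
  | c, _, 0 => c
  | c, ch, n + 1 =>
    natLoop (if (c ^^^ ch) &&& 1 ≠ 0 then (c >>> 1) ^^^ 0x8C else c >>> 1) (ch >>> 1) n

theorem crcByteLoop_natCast (n : Nat) : ∀ (c ch : Nat),
    (crcByteLoop (c : Int) (ch : Int) n).1 = ((natLoop c ch n : Nat) : Int) := by
  induction n with
  | zero => intro c ch; rfl
  | succ n ih =>
    intro c ch
    have e1 : PySem.Int.bxor (c : Int) (ch : Int) = ((c ^^^ ch : Nat) : Int) := by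
      exact_mod_cast PySem.Int.bxor_natCast c ch
    have e2 : PySem.Int.band ((c ^^^ ch : Nat) : Int) 1 = (((c ^^^ ch) &&& 1 : Nat) : Int) := by
      exact_mod_cast PySem.Int.band_natCast (c ^^^ ch) 1
    have e3 : ((c : Int) >>> 1) = ((c >>> 1 : Nat) : Int) := Int.natCast_shiftRight c 1
    have e4 : ((ch : Int) >>> 1) = ((ch >>> 1 : Nat) : Int) := Int.natCast_shiftRight ch 1
    have e5 : PySem.Int.bxor ((c >>> 1 : Nat) : Int) 0x8C = (((c >>> 1) ^^^ 0x8C : Nat) : Int) := by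
      exact_mod_cast PySem.Int.bxor_natCast (c >>> 1) 0x8C
    simp only [crcByteLoop, natLoop, e1, e2, e3, e4, e5]
    by_cases h : (c ^^^ ch) &&& 1 = 0
    · rw [if_neg (by exact_mod_cast not_not_intro h), if_neg (not_not_intro h), ih]
    · rw [if_pos (by exact_mod_cast h), if_pos h, ih]

-- xor-translation invariance of the bit loop
theorem natLoop_xor (n : Nat) : ∀ (c ch x : Nat),
    natLoop (c ^^^ x) (ch ^^^ x) n = natLoop c ch n ^^^ (x >>> n) := by
  induction n with
  | zero => intro c ch x; simp [natLoop]
  | succ n ih =>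
    intro c ch x
    have hmix : ((c ^^^ x) ^^^ (ch ^^^ x)) = c ^^^ ch := by
      rw [Nat.xor_comm ch x, ← Nat.xor_assoc, Nat.xor_assoc c x x, Nat.xor_self, Nat.xor_zero]
    have hsh : x >>> 1 >>> n = x >>> (n + 1) := by
      rw [← Nat.shiftRight_add, Nat.add_comm]
    simp only [natLoop, hmix, Nat.shiftRight_xor_distrib]
    by_cases h : (c ^^^ ch) &&& 1 = 0
    · rw [if_neg (not_not_intro h), if_neg (not_not_intro h), ih, hsh]
    · rw [if_pos h, if_pos h]
      have hre : (c >>> 1) ^^^ (x >>> 1) ^^^ 0x8C = ((c >>> 1) ^^^ 0x8C) ^^^ (x >>> 1) := by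
        rw [Nat.xor_assoc, Nat.xor_comm (x >>> 1), ← Nat.xor_assoc]
      rw [hre, ih, hsh]

theorem natLoop_zero_char (n : Nat) : ∀ c : Nat, natLoop c 0 n = crcStep^[n] c := by
  induction n with
  | zero => intro c; rfl
  | succ n ih =>
    intro c
    simp only [natLoop, Nat.xor_zero, Nat.zero_shiftRight]
    rw [Function.iterate_succ_apply]
    have h2 : c &&& 1 = c % 2 := Nat.and_one_is_mod c
    by_cases h : c &&& 1 = 1
    · rw [if_pos (by omega), ih]; congr 1; unfold crcStep; rw [if_pos h]
    · rw [if_neg (by omega), ih]; congr 1; unfold crcStep; rw [if_neg h]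

-- byte collapse: for a byte ch < 256 the bit loop is the table entry at c ^^^ ch
theorem natLoop_eq_table (c ch : Nat) (h : ch < 256) :
    natLoop c ch 8 = crcStep^[8] (c ^^^ ch) := by
  have h0 : c = (c ^^^ ch) ^^^ ch := by rw [Nat.xor_assoc, Nat.xor_self, Nat.xor_zero]
  have h1 : ch = 0 ^^^ ch := by rw [Nat.zero_xor]
  calc natLoop c ch 8 = natLoop ((c ^^^ ch) ^^^ ch) (0 ^^^ ch) 8 := by rw [← h0, ← h1]
    _ = natLoop (c ^^^ ch) 0 8 ^^^ (ch >>> 8) := natLoop_xor 8 _ _ _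
    _ = crcStep^[8] (c ^^^ ch) := by
        have hz : ch >>> 8 = 0 := by rw [Nat.shiftRight_eq_div_pow]; omega
        rw [hz, Nat.xor_zero, natLoop_zero_char]

theorem crcStep_lt (c : Nat) (h : c < 256) : crcStep c < 256 := by
  unfold crcStep
  have h1 : c >>> 1 < 256 := by rw [Nat.shiftRight_eq_div_pow]; omega
  split_ifs
  · have hx := Nat.xor_lt_two_pow (n := 8) (x := c >>> 1) (y := 0x8C) (by norm_num at h1 ⊢; omega) (by norm_num)
    norm_num at hx; omega
  · omega

theorem crcStep_iter_lt (n : Nat) : ∀ c : Nat, c < 256 → crcStep^[n] c < 256 := by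
  induction n with
  | zero => intro c h; simpa using h
  | succ n ih => intro c h; rw [Function.iterate_succ_apply]; exact ih _ (crcStep_lt c h)

theorem crcTable_getD (i : Nat) (h : i < 256) :
    crcTable.getD i 0 = ((crcStep^[8] i : Nat) : Int) := by
  rw [List.getD_eq_getElem?_getD]
  simp only [crcTable, List.getElem?_map, List.getElem?_range h]
  rfl

-- the two CRC folds agree on any list of bytes starting from any crc < 256
theorem fold_crc_eq : ∀ (line : List Int) (c : Nat), c < 256 →
    (∀ b ∈ line, ∃ m : Nat, b = (m : Int) ∧ m < 256) →
    line.foldl (fun crc char => (crcByteLoop crc char 8).1) (c : Int)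
      = line.foldl (fun crc b => crcTable.getD (PySem.Int.band (PySem.Int.bxor crc b) 255).toNat 0) (c : Int) := by
  intro line
  induction line with
  | nil => intro c _ _; rfl
  | cons b line ih =>
    intro c hc hb
    obtain ⟨m, hbm, hm⟩ := hb b (List.mem_cons_self ..)
    have hxlt : c ^^^ m < 256 := by
      have := Nat.xor_lt_two_pow (n := 8) (x := c) (y := m) (by norm_num; omega) (by norm_num; omega)
      norm_num at this; omega
    have hA : (crcByteLoop (c : Int) b 8).1 = ((crcStep^[8] (c ^^^ m) : Nat) : Int) := by
      rw [hbm, crcByteLoop_natCast, natLoop_eq_table c m hm]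
    have hB : crcTable.getD (PySem.Int.band (PySem.Int.bxor (c : Int) b) 255).toNat 0
        = ((crcStep^[8] (c ^^^ m) : Nat) : Int) := by
      rw [hbm]
      have e1 : PySem.Int.bxor (c : Int) (m : Int) = ((c ^^^ m : Nat) : Int) := by
        exact_mod_cast PySem.Int.bxor_natCast c m
      have e2 : PySem.Int.band ((c ^^^ m : Nat) : Int) 255 = (((c ^^^ m) &&& 255 : Nat) : Int) := by
        exact_mod_cast PySem.Int.band_natCast (c ^^^ m) 255
      have h255 : (c ^^^ m) &&& 255 = c ^^^ m := by
        have e : (255 : Nat) = 2 ^ 8 - 1 := by norm_num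
        rw [e, Nat.and_two_pow_sub_one_eq_mod, Nat.mod_eq_of_lt hxlt]
      rw [e1, e2, h255, Int.toNat_natCast, crcTable_getD _ hxlt]
    simp only [List.foldl_cons, hA, hB]
    exact ih _ (crcStep_iter_lt 8 _ hxlt) (fun b hb' => hb _ (List.mem_cons_of_mem _ hb'))

-- xs[1:-1] is tail + dropLast
theorem slice_one_neg_one (xs : List Int) :
    PySem.List.slice xs (some 1) (some (-1)) = xs.tail.dropLast := by
  simp only [PySem.List.slice, Int.reduceNeg, Order.lt_one_iff, PySem.List.clampIdx_neg_ofNat,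
    zero_le_one, PySem.List.clampIdx_of_nonneg, Int.toNat_one]
  cases xs with
  | nil => rfl
  | cons a xs => simp [List.dropLast_eq_take]

-- ===== VERDICT (by name: the statement is the Claim_ definition above) =====
theorem data_packet_py_spec : Claim_equal_data_packet_py := by
  intro data hdom hpre
  unfold Spec_data_packet_py
  have hlen : data.length = data.toList.length := String.length_toList.symm
  have hle : data.toList.length ≤ 30 := by unfold Pre_data_packet_py at hpre; omega
  have hgt : ¬ data.length > 30 := by omega
  set L : List Int := data.toList.map (fun d => ((d.toNat : Int))) with hL
  have hLlen : L.length = data.toList.length := by simp [hL]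
  set body : List Int := (0 : Int) :: (L ++ List.replicate (30 - data.length) 70) with hbody
  have hres : ([166, 0] ++ L) ++ (List.range (32 - ([166, 0] ++ L).length)).map (fun _ => (70 : Int)) ++ [(166 : Int)]
      = (166 : Int) :: (body ++ [166]) := by
    have hpad : (List.range (32 - ([166, 0] ++ L).length)).map (fun _ => (70 : Int))
        = List.replicate (30 - data.length) 70 := by
      rw [List.map_const']
      congr 1
      simp [hLlen]
    rw [hpad, hbody]
    simp
  have hbytes : ∀ b ∈ body, ∃ m : Nat, b = (m : Int) ∧ m < 256 := by
    intro b hb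
    rcases List.mem_cons.mp hb with h0 | h1
    · exact ⟨0, by simpa using h0, by omega⟩
    · rcases List.mem_append.mp h1 with hmem | hrep
      · rcases List.mem_map.mp hmem with ⟨d, hd, hdb⟩
        refine ⟨d.toNat, hdb.symm, ?_⟩
        have := List.all_eq_true.mp hdom d hd
        simp only [pvDomChar, Bool.or_eq_true, Bool.and_eq_true, decide_eq_true_eq, beq_iff_eq] at this
        omega
      · exact ⟨70, by simpa using (List.eq_of_mem_replicate hrep), by omega⟩
  have hcrc : crc_py body
      = body.foldl (fun crc b => crcTable.getD (PySem.Int.band (PySem.Int.bxor crc b) 255).toNat 0) 0 := by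
    unfold crc_py
    exact_mod_cast fold_crc_eq body 0 (by omega) hbytes
  simp only [data_packet_py, data_packet_py_alt, if_neg hgt, ← hL, ← hbody]
  rw [hres, slice_one_neg_one]
  simp only [List.tail_cons, List.dropLast_concat]
  rw [hcrc]
  simp
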